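-- pv_equiv track=rewrite | github.com/ghollingworth/pichat | citation_renderer.py | _build_line_index
-- ===== SOURCE A (Python) =====
-- def _build_line_index(text):
--     """Return list of (start_offset, end_offset) for each line."""
--     lines = text.splitlines(keepends=True)
--     line_ranges = []
--     offset = 0
--     for line in lines:
--         start = offset
--         offset += len(line)
--         line_ranges.append((start, offset))
--     if not lines:
--         line_ranges.append((0, 0))
--     return line_ranges
-- ===== SOURCE B (Python) =====
-- def _build_line_index(text):
--     """Return list of (start_offset, end_offset) for each line."""
--     n = len(text)
--     ranges = []
--     start = 0
--     i = 0
--     while i < n: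
--         c = text[i]
--         if c == '\r':
--             i += 2 if text[i:i + 2] == '\r\n' else 1
--             ranges.append((start, i))
--             start = i
--         elif c == '\n':
--             i += 1
--             ranges.append((start, i))
--             start = i
--         else:
--             i += 1
--     if start < n:
--         ranges.append((start, n))
--     return ranges if ranges else [(0, 0)]
-- ===== Notes on version B (the rewrite author's own statement) =====
-- stated objective: alternative
-- what changed: B drops splitlines entirely and scans the text once by index, detecting \n/\r/\r\n boundaries directly and emitting (start,end) ranges as it goes, instead of materialising the line substrings and folding their lengths with a running offset.
import Mathlib
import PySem

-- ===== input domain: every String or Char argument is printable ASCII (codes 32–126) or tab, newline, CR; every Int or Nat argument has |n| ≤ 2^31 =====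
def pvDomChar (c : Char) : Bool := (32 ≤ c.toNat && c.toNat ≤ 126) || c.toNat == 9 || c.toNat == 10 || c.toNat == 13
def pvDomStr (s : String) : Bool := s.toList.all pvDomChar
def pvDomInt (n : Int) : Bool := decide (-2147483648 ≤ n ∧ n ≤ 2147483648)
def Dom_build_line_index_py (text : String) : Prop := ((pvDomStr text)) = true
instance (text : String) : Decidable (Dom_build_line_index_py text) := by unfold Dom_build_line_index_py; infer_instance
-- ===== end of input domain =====

-- B returns the same value but finds line boundaries by one direct index scan over the text
-- (detecting \n, \r and \r\n itself) instead of splitlines(keepends=True) plus an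
-- offset-accumulating loop over the line substrings.

-- ===== PORT A =====
-- text.splitlines(keepends=True), ported by hand (PySem.Str.splitlines drops the ends);
-- exact for the line-break characters \n, \r, \r\n — the only ones Dom admits.
def pvSplitKeep : List Char → List Char → List (List Char)
  | acc, [] => if acc = [] then [] else [acc.reverse]
  | acc, '\r' :: '\n' :: rest => (acc.reverse ++ ['\r', '\n']) :: pvSplitKeep [] rest
  | acc, '\r' :: rest => (acc.reverse ++ ['\r']) :: pvSplitKeep [] rest
  | acc, '\n' :: rest => (acc.reverse ++ ['\n']) :: pvSplitKeep [] rest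
  | acc, c :: rest => pvSplitKeep (c :: acc) rest

-- the 'for line in lines' loop: carries 'offset', appends (start, offset) per line
def pvLoopA : List (List Char) → Int → List (Int × Int)
  | [], _ => []
  | line :: rest, offset => (offset, offset + line.length) :: pvLoopA rest (offset + line.length)

def build_line_index_py (text : String) : List (Int × Int) :=
  let lines := pvSplitKeep [] text.toList
  let line_ranges := pvLoopA lines 0
  if lines = [] then line_ranges ++ [(0, 0)] else line_ranges

-- ===== PORT B =====
-- the while loop of Source B on the remaining suffix: 'start' and 'i' are the two indices;
-- text[i:i+2] == '\r\n' is the peek at the next character; the final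
-- 'if start < n: ranges.append((start, n))' is the [] case (there i = n).
def pvScanB : List Char → Int → Int → List (Int × Int)
  | [], start, i => if start < i then [(start, i)] else []
  | '\r' :: '\n' :: rest, start, i => (start, i + 2) :: pvScanB rest (i + 2) (i + 2)
  | '\r' :: rest, start, i => (start, i + 1) :: pvScanB rest (i + 1) (i + 1)
  | '\n' :: rest, start, i => (start, i + 1) :: pvScanB rest (i + 1) (i + 1)
  | _ :: rest, start, i => pvScanB rest start (i + 1)

def build_line_index_py_alt (text : String) : List (Int × Int) :=
  let ranges := pvScanB text.toList 0 0
  if ranges = [] then [(0, 0)] else ranges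

-- ===== PRECONDITION & SPEC =====
def Spec_build_line_index_py (text : String) (out : List (Int × Int)) : Prop := out = build_line_index_py_alt text
instance (text : String) (out : List (Int × Int)) : Decidable (Spec_build_line_index_py text out) := by unfold Spec_build_line_index_py; infer_instance

-- ===== CLAIM (what is proved, stated in full; the proofs are below) =====
def Claim_equal_build_line_index_py : Prop := ∀ (text : String), Dom_build_line_index_py text → Spec_build_line_index_py text (build_line_index_py text)

-- ===== LEMMAS AND PROOFS =====

-- Invariant: A's offset loop over the kept-ends lines of cs, with acc the (reversed)
-- pending partial line, equals B's scan of cs with i = start + acc.length.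
theorem pvLoop_eq_scan (acc cs : List Char) : ∀ (start : Int),
    pvLoopA (pvSplitKeep acc cs) start = pvScanB cs start (start + acc.length) := by
  induction acc, cs using pvSplitKeep.induct with
  | case1 =>
    intro start; simp [pvSplitKeep, pvScanB, pvLoopA]
  | case2 acc h =>
    intro start
    have : 0 < acc.length := List.length_pos_iff.mpr h
    simp [pvSplitKeep, pvScanB, pvLoopA, h]
  | case3 acc rest ih =>
    intro start
    simp only [pvSplitKeep, pvScanB, pvLoopA, ih]
    simp only [List.length_append, List.length_reverse, List.length_cons, List.length_nil]
    push_cast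
    refine congr_arg₂ _ (by refine congr_arg₂ _ (by ring) (by ring)) (by congr 1 <;> ring)
  | case4 acc rest h ih =>
    intro start
    rw [pvSplitKeep, pvScanB]
    · simp only [pvLoopA, ih]
      simp only [List.length_append, List.length_reverse, List.length_cons, List.length_nil]
      push_cast
      refine congr_arg₂ _ (by refine congr_arg₂ _ (by ring) (by ring)) (by congr 1 <;> ring)
    · exact h
    · exact h
  | case5 acc rest ih =>
    intro start
    simp only [pvSplitKeep, pvScanB, pvLoopA, ih]
    simp only [List.length_append, List.length_reverse, List.length_cons, List.length_nil]
    push_cast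
    refine congr_arg₂ _ (by refine congr_arg₂ _ (by ring) (by ring)) (by congr 1 <;> ring)
  | case6 acc c rest h1 h2 h3 ih =>
    intro start
    rw [pvSplitKeep, pvScanB]
    · rw [ih]
      congr 1
      simp
      ring
    · exact h1
    · exact h2
    · exact h3
    · exact h1
    · exact h2
    · exact h3

-- ===== VERDICT (by name: the statement is the Claim_ definition above) =====
theorem build_line_index_py_spec : Claim_equal_build_line_index_py := by
  intro text _
  unfold Spec_build_line_index_py build_line_index_py build_line_index_py_alt
  have h : pvLoopA (pvSplitKeep [] text.toList) 0 = pvScanB text.toList 0 0 := by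
    simpa using pvLoop_eq_scan [] text.toList 0
  by_cases hl : pvSplitKeep [] text.toList = []
  · rw [hl] at h
    simp only [pvLoopA] at h
    simp [hl, ← h, pvLoopA]
  · obtain ⟨l, rest, hrw⟩ : ∃ l rest, pvSplitKeep [] text.toList = l :: rest := by
      cases hx : pvSplitKeep [] text.toList with
      | nil => exact absurd hx hl
      | cons l rest => exact ⟨l, rest, rfl⟩
    have hne : pvScanB text.toList 0 0 ≠ [] := by
      rw [← h, hrw]; simp [pvLoopA]
    simp only [if_neg hl, if_neg hne]
    exact h
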